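-- pv_equiv track=rewrite | github.com/Jaymin28/Hackerrank-Solutions | Cavity Map.py | cavityMap
-- ===== SOURCE A (Python) =====
-- def cavityMap(grid):
--     # Write your code here
--     leng = len(grid)
--     output = [[0]*leng for _ in range(leng)]
--
--     for ind in range(leng):
--         for jnd in range(leng):
--             if (0 < ind < leng-1 and 0 < jnd < leng-1 and
--                grid[ind][jnd] > grid[ind+1][jnd] and
--                grid[ind][jnd] > grid[ind-1][jnd] and
--                grid[ind][jnd] > grid[ind][jnd+1] and
--                grid[ind][jnd] > grid[ind][jnd-1]):
--                 output[ind][jnd] = 'X'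
--             else:
--                 output[ind][jnd] = grid[ind][jnd]
--
--     return list(map(lambda x: ''.join(x), output))
-- ===== SOURCE B (Python) =====
-- def cavityMap(grid):
--     n = len(grid)
--     rows = [r[:n] for r in grid]
--     cols = [''.join(r[j] for r in rows) for j in range(n)]
--
--     def peaks(line):
--         # interior positions that strictly exceed both line neighbours
--         return [k + 1 for k, (l, c, r) in enumerate(zip(line, line[1:], line[2:]))
--                 if c > l and c > r]
--
--     cpeaks = [peaks(c) for c in cols]
--     out = []
--     for i, r in enumerate(rows):
--         hp = peaks(r)
--         out.append(''.join('X' if j in hp and i in cpeaks[j] else ch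
--                            for j, ch in enumerate(r)))
--     return out
-- ===== Notes on version B (the rewrite author's own statement) =====
-- stated objective: alternative
-- what changed: B decomposes the 2D cavity test into two 1D scans: it builds the transposed grid, computes the interior strict-peak positions of every row and of every column with a zip-of-shifted-streams scan, and marks a cell 'X' exactly when it is a peak of both its row and its column, instead of A's doubly indexed pass over a preallocated n*n matrix with a per-cell boundary-and-four-neighbours guard.
import Mathlib
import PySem

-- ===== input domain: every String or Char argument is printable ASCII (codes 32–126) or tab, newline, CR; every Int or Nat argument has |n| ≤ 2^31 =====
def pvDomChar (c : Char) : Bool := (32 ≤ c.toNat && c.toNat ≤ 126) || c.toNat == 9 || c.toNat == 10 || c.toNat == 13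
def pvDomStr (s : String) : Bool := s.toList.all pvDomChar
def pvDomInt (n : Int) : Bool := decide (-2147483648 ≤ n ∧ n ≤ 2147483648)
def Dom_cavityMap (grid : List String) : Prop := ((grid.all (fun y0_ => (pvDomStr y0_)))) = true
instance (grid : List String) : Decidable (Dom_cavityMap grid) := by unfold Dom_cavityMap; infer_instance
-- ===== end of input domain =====

-- B replaces A's doubly indexed scan into a preallocated n*n matrix by a decomposition of the
-- 2D peak test into two 1D scans: 1D interior peaks of every row and of every column of the
-- transposed grid, intersected to mark the cavities (objective: alternative).

-- grid[i][j] (characters); exact whenever i, j are in range, which Pre_ guarantees for every access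
def pvAt (g : List (List Char)) (i j : Int) : Char :=
  PySem.List.pyGetD (PySem.List.pyGetD g i []) j '0'

-- ===== PORT A =====
def cavityMap (grid : List String) : List String :=
  let leng : Int := grid.length
  let g : List (List Char) := grid.map String.toList
  -- output = [[0]*leng for _ in range(leng)]; placeholder '0' stands for the int 0, every cell is overwritten
  let output0 : List (List Char) := (List.range grid.length).map (fun _ => List.replicate grid.length '0')
  let output :=
    (PySem.List.pyRange 0 leng 1).foldl (fun output ind =>
      PySem.List.pySetD output ind
        ((PySem.List.pyRange 0 leng 1).foldl (fun row jnd =>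
            PySem.List.pySetD row jnd
              (if 0 < ind ∧ ind < leng - 1 ∧ 0 < jnd ∧ jnd < leng - 1 ∧
                  pvAt g (ind+1) jnd < pvAt g ind jnd ∧
                  pvAt g (ind-1) jnd < pvAt g ind jnd ∧
                  pvAt g ind (jnd+1) < pvAt g ind jnd ∧
                  pvAt g ind (jnd-1) < pvAt g ind jnd
               then 'X' else pvAt g ind jnd))
          (PySem.List.pyGetD output ind []))) output0
  output.map (fun x => String.ofList x)

-- ===== PORT B =====
-- zip(line, line[1:], line[2:]) of Source B (three parallel streams)
def pvZip3 {α : Type} : List α → List α → List α → List (α × α × α)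
  | a :: as_, b :: bs, c :: cs => (a, b, c) :: pvZip3 as_ bs cs
  | _, _, _ => []

-- peaks(line): interior positions strictly above both line neighbours
def pvPeaks (line : List Char) : List Int :=
  (PySem.List.enumerate
      (pvZip3 line (PySem.List.slice line (some 1) none) (PySem.List.slice line (some 2) none)) 0).filterMap
    (fun p => if p.2.1 < p.2.2.1 ∧ p.2.2.2 < p.2.2.1 then some (p.1 + 1) else none)

def cavityMap_alt (grid : List String) : List String :=
  let n : Int := grid.length
  let rows : List (List Char) := grid.map (fun r => PySem.List.slice r.toList none (some n))
  -- r[j]; exact whenever the access is in range, which Pre_ guarantees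
  let cols : List (List Char) :=
    (PySem.List.pyRange 0 n 1).map (fun j => rows.map (fun r => PySem.List.pyGetD r j ' '))
  let cpeaks : List (List Int) := cols.map pvPeaks
  (PySem.List.enumerate rows 0).map (fun p =>
    let hp := pvPeaks p.2
    String.ofList ((PySem.List.enumerate p.2 0).map (fun q =>
      if q.1 ∈ hp ∧ p.1 ∈ PySem.List.pyGetD cpeaks q.1 [] then 'X' else q.2)))

-- ===== PRECONDITION & SPEC =====
-- Pre_ excludes exactly the grids with a row shorter than len(grid): on those A raises IndexError.
def Pre_cavityMap (grid : List String) : Prop :=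
  ∀ s ∈ grid, grid.length ≤ s.toList.length
instance (grid : List String) : Decidable (Pre_cavityMap grid) := by unfold Pre_cavityMap; infer_instance

def pvWitness_cavityMap : List String := ["989", "191", "111"]

def Spec_cavityMap (grid : List String) (out : List String) : Prop := out = cavityMap_alt grid
instance (grid : List String) (out : List String) : Decidable (Spec_cavityMap grid out) := by unfold Spec_cavityMap; infer_instance

-- ===== CLAIM (what is proved, stated in full; the proofs are below) =====
def Claim_equal_cavityMap : Prop := ∀ (grid : List String), Dom_cavityMap grid → Pre_cavityMap grid → Spec_cavityMap grid (cavityMap grid)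

-- ===== LEMMAS AND PROOFS =====

-- the value A writes into cell (i, j)
def pvCellA (g : List (List Char)) (L i j : Int) : Char :=
  if 0 < i ∧ i < L - 1 ∧ 0 < j ∧ j < L - 1 ∧
     pvAt g (i+1) j < pvAt g i j ∧ pvAt g (i-1) j < pvAt g i j ∧
     pvAt g i (j+1) < pvAt g i j ∧ pvAt g i (j-1) < pvAt g i j
  then 'X' else pvAt g i j

-- the common normal form both ports are reduced to
def pvNF (grid : List String) : List String :=
  ((List.range grid.length).map (fun (i : Nat) =>
      (List.range grid.length).map (fun (j : Nat) =>
        pvCellA (grid.map String.toList) (grid.length : Int) (i : Int) (j : Int)))).map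
    (fun r => String.ofList r)

-- overwrite-every-index fold (A's inner loop)
theorem pv_fold_set_prefix {α : Type} (v : Nat → α) :
    ∀ (m : Nat) (r : List α), m ≤ r.length →
      (List.range m).foldl (fun r k => r.set k (v k)) r = (List.range m).map v ++ r.drop m := by
  intro m
  induction m with
  | zero => simp
  | succ m ih =>
    intro r hr
    rw [List.range_succ, List.foldl_append, List.foldl_cons, List.foldl_nil,
        ih r (by omega)]
    have hm : m < r.length := by omega
    have hdrop : r.drop m = r[m] :: r.drop (m + 1) := List.drop_eq_getElem_cons hm
    rw [hdrop, List.set_append, List.map_append]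
    simp [-List.getElem_cons_drop]

-- pointwise description of a fold rewriting rows[k] := W k rows[k] at strictly increasing indices
theorem pv_fold_rowset {α : Type} (d : α) (W : Nat → α → α) :
    ∀ (ks : List Nat) (rows : List α), ks.Pairwise (· < ·) →
      (((ks.foldl (fun rows k => rows.set k (W k (rows.getD k d))) rows)).length = rows.length ∧
       ∀ i, i < rows.length →
         (ks.foldl (fun rows k => rows.set k (W k (rows.getD k d))) rows).getD i d =
           if i ∈ ks then W i (rows.getD i d) else rows.getD i d) := by
  intro ks
  induction ks with
  | nil => simp
  | cons k ks ih =>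
    intro rows hp
    rw [List.pairwise_cons] at hp
    obtain ⟨hk, hp⟩ := hp
    simp only [List.foldl_cons]
    obtain ⟨ihlen, ihget⟩ := ih (rows.set k (W k (rows.getD k d))) hp
    refine ⟨by rw [ihlen]; simp, ?_⟩
    intro i hi
    rw [ihget i (by simpa using hi)]
    simp only [List.getD, List.mem_cons]
    by_cases hik : i ∈ ks
    · have hki : k < i := hk i hik
      rw [List.getElem?_set_ne (by omega : k ≠ i)]
      simp [hik]
    · by_cases hke : i = k
      · subst hke
        rw [List.getElem?_set_self hi]
        simp [hik]
      · rw [List.getElem?_set_ne (by omega : k ≠ i)]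
        simp [hik, hke]

theorem pvCellA_def (g : List (List Char)) (L i j : Int) :
    (if 0 < i ∧ i < L - 1 ∧ 0 < j ∧ j < L - 1 ∧
        pvAt g (i+1) j < pvAt g i j ∧ pvAt g (i-1) j < pvAt g i j ∧
        pvAt g i (j+1) < pvAt g i j ∧ pvAt g i (j-1) < pvAt g i j
     then 'X' else pvAt g i j) = pvCellA g L i j := rfl

theorem pvA_fold (g : List (List Char)) (n : Nat) :
    List.foldl
      (fun x y => x.set y
        (List.foldl (fun x y_1 => x.set y_1 (pvCellA g (n : Int) (y : Int) (y_1 : Int)))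
          (x.getD y []) (List.range n)))
      (List.map (fun _ => List.replicate n '0') (List.range n)) (List.range n)
    = (List.range n).map (fun (i : Nat) => (List.range n).map (fun (j : Nat) => pvCellA g (n : Int) (i : Int) (j : Int))) := by
  obtain ⟨hlen, hget⟩ := pv_fold_rowset ([] : List Char)
    (fun k row => (List.range n).foldl (fun row k' => row.set k' (pvCellA g (n : Int) (k : Int) (k' : Int))) row)
    (List.range n) (List.map (fun _ => List.replicate n '0') (List.range n))
    (List.pairwise_lt_range)
  refine List.ext_getElem (by rw [hlen]; simp) ?_
  intro i h1 h2
  have hi : i < n := by simpa using h2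
  have hrows0 : (List.map (fun _ => List.replicate n '0') (List.range n)).getD i [] = List.replicate n '0' := by
    rw [List.getD_eq_getElem _ _ (by simpa using hi)]
    simp
  have hW : (List.range n).foldl
      (fun row k' => row.set k' (pvCellA g (n : Int) (i : Int) (k' : Int)))
      (List.replicate n '0')
      = (List.range n).map (fun (j : Nat) => pvCellA g (n : Int) (i : Int) (j : Int)) := by
    rw [pv_fold_set_prefix _ n _ (by simp)]
    simp
  rw [← List.getD_eq_getElem _ ([] : List Char) h1, hget i (by simpa using hi)]
  simp only [List.mem_range, hi, if_true, hrows0, hW]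
  simp

theorem pvA_char (grid : List String) : cavityMap grid = pvNF grid := by
  simp only [cavityMap]
  rw [PySem.List.pyRange_one]
  simp only [List.foldl_map, Int.sub_zero, Int.toNat_natCast, zero_add,
    PySem.List.pySetD_natCast, PySem.List.pyGetD_natCast]
  simp only [pvCellA_def]
  rw [pvA_fold]
  rfl

theorem pvAt_nat (g : List (List Char)) (i j : Nat) :
    pvAt g (i : Int) (j : Int) = (g.getD i []).getD j '0' := by
  simp [pvAt, PySem.List.pyGetD_natCast]

-- getD through drop
theorem pv_getD_drop {α : Type} (d : α) :
    ∀ (m : Nat) (l : List α) (k : Nat), (l.drop m).getD k d = l.getD (m + k) d := by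
  intro m
  induction m with
  | zero => simp
  | succ m ih =>
    intro l k
    cases l with
    | nil => simp
    | cons a l =>
      rw [List.drop_succ_cons, ih l k]
      simp only [List.getD]
      rw [show m + 1 + k = (m + k) + 1 by omega]
      simp

-- pvZip3 as a map over range of the common length
theorem pvZip3_eq_map {α : Type} (da db dc : α) :
    ∀ (as_ bs cs : List α),
      pvZip3 as_ bs cs =
        (List.range (min as_.length (min bs.length cs.length))).map
          (fun k => (as_.getD k da, bs.getD k db, cs.getD k dc)) := by
  intro as_
  induction as_ with
  | nil => intro bs cs; simp [pvZip3]
  | cons a as_ ih =>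
    intro bs cs
    cases bs with
    | nil => simp [pvZip3]
    | cons b bs =>
      cases cs with
      | nil => simp [pvZip3]
      | cons c cs =>
        simp only [pvZip3, List.length_cons]
        rw [show min (as_.length + 1) (min (bs.length + 1) (cs.length + 1))
              = min as_.length (min bs.length cs.length) + 1 by omega,
            List.range_succ_eq_map]
        simp only [List.map_cons, List.map_map]
        rw [ih bs cs]
        simp [List.getD, Function.comp]

-- mapping over an enumeration is mapping over the index range
theorem pv_map_enum {α β : Type} (xs : List α) (d : α) (F : Int × α → β) :
    (PySem.List.enumerate xs 0).map F
      = (List.range xs.length).map (fun (k : Nat) => F (((k : Nat) : Int), xs.getD k d)) := by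
  refine List.ext_getElem (by simp) ?_
  intro k h1 h2
  have hk : k < xs.length := by simpa using h2
  simp only [List.getElem_map, PySem.List.getElem_enumerate, List.getElem_range]
  rw [List.getD_eq_getElem xs d hk]
  simp

-- membership in the 1D peak list
theorem pvPeaks_mem (line : List Char) (x : Int) :
    x ∈ pvPeaks line ↔
      ∃ m : Nat, m < line.length - 2 ∧
        (line.getD m '0' < line.getD (m + 1) '0' ∧ line.getD (m + 2) '0' < line.getD (m + 1) '0') ∧
        x = (m : Int) + 1 := by
  simp only [pvPeaks]
  rw [PySem.List.slice_from _ (by omega : (0 : Int) ≤ 1),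
      PySem.List.slice_from _ (by omega : (0 : Int) ≤ 2),
      pvZip3_eq_map '0' '0' '0',
      show min line.length (min (line.drop (1 : Int).toNat).length (line.drop (2 : Int).toNat).length)
          = line.length - 2 by simp; omega]
  simp only [pv_getD_drop]
  rw [show (1 : Int).toNat = 1 by rfl, show (2 : Int).toNat = 2 by rfl]
  constructor
  · intro hx
    rw [List.mem_filterMap] at hx
    obtain ⟨p, hp, hpx⟩ := hx
    rw [PySem.List.mem_enumerate_iff] at hp
    obtain ⟨m, hm, rfl⟩ := hp
    have hm' : m < line.length - 2 := by simpa using hm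
    simp only [List.getElem_map, List.getElem_range] at hpx
    by_cases hc : line.getD m '0' < line.getD (1 + m) '0' ∧ line.getD (2 + m) '0' < line.getD (1 + m) '0'
    · rw [if_pos hc] at hpx
      refine ⟨m, hm', ?_, ?_⟩
      · constructor
        · rw [show m + 1 = 1 + m by omega]; exact hc.1
        · rw [show m + 1 = 1 + m by omega, show m + 2 = 2 + m by omega]; exact hc.2
      · have := Option.some.inj hpx
        omega
    · rw [if_neg hc] at hpx
      exact absurd hpx (by simp)
  · rintro ⟨m, hm, ⟨h1, h2⟩, rfl⟩
    rw [List.mem_filterMap]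
    refine ⟨((0 : Int) + (m : Int),
        (line.getD m '0', line.getD (1 + m) '0', line.getD (2 + m) '0')), ?_, ?_⟩
    · rw [PySem.List.mem_enumerate_iff]
      refine ⟨m, by simpa using hm, ?_⟩
      rw [List.getElem_map]
      simp only [List.getElem_range]
    · rw [if_pos ⟨by rw [show 1 + m = m + 1 by omega]; exact h1,
          by rw [show 1 + m = m + 1 by omega, show 2 + m = m + 2 by omega]; exact h2⟩]
      simp

-- one output cell of B equals A's cell value
theorem pv_cell_eq (g rows : List (List Char)) (N i j : Nat)
    (hrN : rows.length = N)
    (hrowlen : ∀ t, t < N → (rows.getD t []).length = N)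
    (hag : ∀ (d1 : Char) (t u : Nat), t < N → u < N → (rows.getD t []).getD u d1 = (g.getD t []).getD u '0')
    (hi : i < N) (hj : j < N) :
    (if ((j : Int) ∈ pvPeaks (rows.getD i []) ∧ (i : Int) ∈ pvPeaks (rows.map (fun r => r.getD j ' ')))
     then 'X' else (rows.getD i []).getD j ' ')
      = pvCellA g (N : Int) (i : Int) (j : Int) := by
  have hcol : ∀ (t : Nat), t < N → (rows.map (fun r => r.getD j ' ')).getD t '0' = (g.getD t []).getD j '0' := by
    intro t ht
    rw [List.getD_eq_getElem _ _ (by simpa [hrN] using ht), List.getElem_map,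
        ← List.getD_eq_getElem rows [] (by omega)]
    exact hag ' ' t j ht hj
  have hcollen : (rows.map (fun r => r.getD j ' ')).length = N := by simp [hrN]
  have hrow := hrowlen i hi
  have hmemrow : ((j : Int) ∈ pvPeaks (rows.getD i [])) ↔ (1 ≤ j ∧ j + 1 < N ∧
      (g.getD i []).getD (j - 1) '0' < (g.getD i []).getD j '0' ∧
      (g.getD i []).getD (j + 1) '0' < (g.getD i []).getD j '0') := by
    rw [pvPeaks_mem]
    constructor
    · rintro ⟨m, hm, ⟨h1, h2⟩, he⟩
      rw [hrow] at hm
      have hjm : j = m + 1 := by omega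
      subst hjm
      rw [hag '0' i m hi (by omega), hag '0' i (m + 1) hi (by omega)] at h1
      rw [hag '0' i (m + 1 + 1) hi (by omega), hag '0' i (m + 1) hi (by omega),
          show m + 1 + 1 = m + 2 from rfl] at h2
      exact ⟨by omega, by omega, by simpa [show m + 1 - 1 = m from by omega] using h1,
        by simpa using h2⟩
    · rintro ⟨hj1, hj2, h1, h2⟩
      refine ⟨j - 1, by rw [hrow]; omega, ⟨?_, ?_⟩, by omega⟩
      · rw [show j - 1 + 1 = j from by omega, hag '0' i (j - 1) hi (by omega),
            hag '0' i j hi hj]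
        exact h1
      · rw [show j - 1 + 1 = j from by omega, show j - 1 + 2 = j + 1 from by omega,
            hag '0' i (j + 1) hi (by omega), hag '0' i j hi hj]
        exact h2
  have hmemcol : ((i : Int) ∈ pvPeaks (rows.map (fun r => r.getD j ' '))) ↔ (1 ≤ i ∧ i + 1 < N ∧
      (g.getD (i - 1) []).getD j '0' < (g.getD i []).getD j '0' ∧
      (g.getD (i + 1) []).getD j '0' < (g.getD i []).getD j '0') := by
    rw [pvPeaks_mem]
    constructor
    · rintro ⟨m, hm, ⟨h1, h2⟩, he⟩
      rw [hcollen] at hm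
      have him : i = m + 1 := by omega
      subst him
      rw [hcol m (by omega), hcol (m + 1) (by omega)] at h1
      rw [hcol (m + 2) (by omega), hcol (m + 1) (by omega)] at h2
      exact ⟨by omega, by omega, by simpa [show m + 1 - 1 = m from by omega] using h1,
        by simpa [show m + 1 + 1 = m + 2 from rfl] using h2⟩
    · rintro ⟨hi1, hi2, h1, h2⟩
      refine ⟨i - 1, by rw [hcollen]; omega, ⟨?_, ?_⟩, by omega⟩
      · rw [show i - 1 + 1 = i from by omega, hcol (i - 1) (by omega), hcol i hi]
        exact h1
      · rw [show i - 1 + 1 = i from by omega, show i - 1 + 2 = i + 1 from by omega,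
            hcol (i + 1) (by omega), hcol i hi]
        exact h2
  rw [pvCellA]
  refine if_congr ?_ rfl ?_
  · rw [hmemrow, hmemcol]
    constructor
    · rintro ⟨⟨hj1, hj2, hL, hR⟩, ⟨hi1, hi2, hU, hD⟩⟩
      refine ⟨by omega, by omega, by omega, by omega, ?_, ?_, ?_, ?_⟩
      · rw [show (i : Int) + 1 = ((i + 1 : Nat) : Int) from by omega, pvAt_nat, pvAt_nat]
        exact hD
      · rw [show (i : Int) - 1 = ((i - 1 : Nat) : Int) from by omega, pvAt_nat, pvAt_nat]
        exact hU
      · rw [show (j : Int) + 1 = ((j + 1 : Nat) : Int) from by omega, pvAt_nat, pvAt_nat]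
        exact hR
      · rw [show (j : Int) - 1 = ((j - 1 : Nat) : Int) from by omega, pvAt_nat, pvAt_nat]
        exact hL
    · rintro ⟨hi1, hi2, hj1, hj2, hD, hU, hR, hL⟩
      have hi1' : 1 ≤ i := by omega
      have hj1' : 1 ≤ j := by omega
      rw [show (i : Int) + 1 = ((i + 1 : Nat) : Int) from by omega, pvAt_nat, pvAt_nat] at hD
      rw [show (i : Int) - 1 = ((i - 1 : Nat) : Int) from by omega, pvAt_nat, pvAt_nat] at hU
      rw [show (j : Int) + 1 = ((j + 1 : Nat) : Int) from by omega, pvAt_nat, pvAt_nat] at hR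
      rw [show (j : Int) - 1 = ((j - 1 : Nat) : Int) from by omega, pvAt_nat, pvAt_nat] at hL
      exact ⟨⟨by omega, by omega, hL, hR⟩, ⟨by omega, by omega, hU, hD⟩⟩
  · rw [pvAt_nat]
    exact hag ' ' i j hi hj

-- the characterisation of B
theorem pvB_char (grid : List String) (hpre : Pre_cavityMap grid) :
    cavityMap_alt grid = pvNF grid := by
  simp only [cavityMap_alt, pvNF]
  set N := grid.length with hN
  set g : List (List Char) := grid.map String.toList with hg
  have hslice : grid.map (fun r => PySem.List.slice r.toList none (some (N : Int)))
      = grid.map (fun r => r.toList.take N) := by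
    simp [PySem.List.slice_to_natCast]
  rw [hslice]
  set rows : List (List Char) := grid.map (fun r => r.toList.take N) with hr
  have hrlen : rows.length = N := by simp [hr, hN]
  have hrowlen : ∀ i, i < N → (rows.getD i []).length = N := by
    intro i hi
    rw [hr, List.getD_eq_getElem _ _ (by simpa [hN] using hi)]
    simp only [List.getElem_map, List.length_take]
    exact Nat.min_eq_left (hpre _ (List.getElem_mem _))
  have hag : ∀ (d1 : Char) (t u : Nat), t < N → u < N →
      (rows.getD t []).getD u d1 = (g.getD t []).getD u '0' := by
    intro d1 t u ht hu
    have htn : t < grid.length := by simpa [hN] using ht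
    have hfull : N ≤ grid[t].toList.length := hpre _ (List.getElem_mem _)
    have e1 : rows.getD t [] = grid[t].toList.take N := by
      rw [hr, List.getD_eq_getElem _ _ (by simpa using htn)]; simp
    have e2 : g.getD t [] = grid[t].toList := by
      rw [hg, List.getD_eq_getElem _ _ (by simpa using htn)]; simp
    rw [e1, e2, List.getD_eq_getElem _ _ (by simp only [List.length_take]; omega),
        List.getD_eq_getElem _ _ (by omega)]
    exact List.getElem_take
  rw [PySem.List.pyRange_one]
  simp only [Int.sub_zero, Int.toNat_natCast, zero_add, List.map_map]
  rw [pv_map_enum rows ([] : List Char), hrlen]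
  refine List.map_congr_left ?_
  intro i hi
  rw [List.mem_range] at hi
  have hiN : i < N := hi
  simp only [Function.comp]
  rw [pv_map_enum (rows.getD i []) ' ', hrowlen i hiN]
  refine congrArg String.ofList ?_
  refine List.map_congr_left ?_
  intro j hj
  rw [List.mem_range] at hj
  have hcp : PySem.List.pyGetD ((List.range N).map (fun k => pvPeaks (rows.map (fun r => PySem.List.pyGetD r ((k : Nat) : Int) ' ')))) ((j : Nat) : Int) []
      = pvPeaks (rows.map (fun r => r.getD j ' ')) := by
    rw [PySem.List.pyGetD_natCast, List.getD_eq_getElem _ _ (by simpa using hj),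
        List.getElem_map, List.getElem_range]
    simp [PySem.List.pyGetD_natCast]
  simp only [Function.comp_def]
  rw [hcp]
  exact pv_cell_eq g rows N i j hrlen hrowlen hag hiN hj

-- ===== VERDICT (by name: the statement is the Claim_ definition above) =====
theorem cavityMap_spec : Claim_equal_cavityMap := by
  intro grid _ hpre
  unfold Spec_cavityMap
  rw [pvA_char, pvB_char grid hpre]
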